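-- pv_equiv track=rewrite | github.com/dhiraje1990/py-grep | app/main.py | _expand_group
-- ===== SOURCE A (Python) =====
-- def _expand_group(group_str: str) -> set[str]:
--     """
--     Parse the group string and return a set of all allowed characters.
--
--     Parsing rules:
--         - If we see X-Y (a char, a dash, another char), it's a range.
--           We expand it to every character from X to Y inclusive.
--         - Otherwise, each character is added to the set individually.
--
--     Args:
--         group_str (str): e.g. "a-z", "abc", "a-z0-9", "aeiou0-9"
--
--     Returns:
--         set[str]: All characters that this group should match.
--
--     Example:
--         _expand_group("abc")    → {'a', 'b', 'c'}
--         _expand_group("a-c")    → {'a', 'b', 'c'}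
--         _expand_group("a-z0-9") → {'a','b',...,'z','0','1',...,'9'}
--     """
--     allowed: set[str] = set()
--
--     # Index-based loop so we can peek ahead to detect ranges (X-Y)
--     i: int = 0
--     while i < len(group_str):
--
--         # Check if this is a range: current char, dash, next char
--         # e.g. 'a', '-', 'z'  →  range from 'a' to 'z'
--         is_range: bool = (
--             i + 2 < len(group_str) and  # enough chars left for X-Y
--             group_str[i + 1] == '-'      # middle char is a dash
--         )
--
--         if is_range:
--             range_start: str = group_str[i]
--             range_end: str   = group_str[i + 2]
--
--             # Validate: start must come before end in ASCII order
--             if ord(range_start) > ord(range_end):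
--                 raise ValueError(
--                     f"Invalid range '{range_start}-{range_end}' in "
--                     f"character group — start must be <= end in ASCII order."
--                 )
--
--             # Expand: add every character from range_start to range_end
--             for code in range(ord(range_start), ord(range_end) + 1):
--                 allowed.add(chr(code))
--
--             # Jump past all 3 characters: start, dash, end
--             i += 3
--
--         else:
--             # Plain character — just add it directly
--             allowed.add(group_str[i])
--             i += 1
--
--     return allowed
-- ===== SOURCE B (Python) =====
-- import re
--
-- def _expand_group(group_str: str) -> set[str]:
--     """Regex tokenizer + two-pass design: re.finditer splits the group into
--     inclusive (start, end) spans (a plain character c is the span (c, c)),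
--     a validation pass raises on an invalid span, and one set comprehension
--     expands them all."""
--     spans = [(m.group(1), m.group(2)) if m.group(2) is not None
--              else (m.group(3), m.group(3))
--              for m in re.finditer(r'(.)-(.)|(.)', group_str, re.DOTALL)]
--     for start, end in spans:
--         if ord(start) > ord(end):
--             raise ValueError(
--                 f"Invalid range '{start}-{end}' in "
--                 f"character group — start must be <= end in ASCII order."
--             )
--     return {chr(code) for start, end in spans
--             for code in range(ord(start), ord(end) + 1)}
-- ===== Notes on version B (the rewrite author's own statement) =====
-- stated objective: alternative
-- what changed: Replaced the index-based while loop that peeks ahead and mutates a set in place with a regex tokenizer (re.finditer, matching a char-dash-char range first and otherwise a single character, with DOTALL) producing a list of inclusive spans, a separate validation pass, and one final set comprehension expanding all spans.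
import Mathlib
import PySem

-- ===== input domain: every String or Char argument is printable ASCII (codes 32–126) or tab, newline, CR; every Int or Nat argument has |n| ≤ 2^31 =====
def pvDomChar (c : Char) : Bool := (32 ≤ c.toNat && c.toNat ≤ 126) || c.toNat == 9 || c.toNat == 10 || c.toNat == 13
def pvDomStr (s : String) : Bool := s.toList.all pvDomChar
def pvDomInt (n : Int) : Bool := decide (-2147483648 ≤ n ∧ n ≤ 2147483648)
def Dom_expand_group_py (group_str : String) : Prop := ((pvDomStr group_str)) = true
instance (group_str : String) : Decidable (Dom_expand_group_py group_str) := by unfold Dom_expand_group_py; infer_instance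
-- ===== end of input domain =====

-- B replaces A's index-based while loop mutating a set with a regex tokenization
-- into (start, end) spans, a validation pass, and one final set comprehension.

-- ===== PORT A =====
-- allowed.add(chr(code)) for code in range(ord(start), ord(end)+1)
def pvExpandRangeA (s : PySem.Set String) (a c : Char) : PySem.Set String :=
  (PySem.List.pyRange (a.toNat : Int) ((c.toNat : Int) + 1) 1).foldl
    (fun acc code => PySem.Set.add acc (String.ofList [Char.ofNat code.toNat])) s

-- A's while loop over index i, written as recursion on the suffix group_str[i:];
-- 'i + 2 < len' ∧ 'group_str[i+1] == "-"' is exactly the first pattern with b = '-'.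
-- none = the ValueError A raises when ord(start) > ord(end).
def pvLoopA : PySem.Set String → List Char → Option (PySem.Set String)
  | s, a :: b :: c :: rest =>
      if b = '-' then
        if a.toNat > c.toNat then none
        else pvLoopA (pvExpandRangeA s a c) rest
      else pvLoopA (PySem.Set.add s (String.ofList [a])) (b :: c :: rest)
  | s, a :: rest => pvLoopA (PySem.Set.add s (String.ofList [a])) rest
  | s, [] => some s

def expand_group_py (group_str : String) : List String :=
  (pvLoopA PySem.Set.empty group_str.toList).getD []   -- getD unused under Pre_

-- ===== PORT B =====
-- Source B's re.finditer(r'(.)-(.)|(.)', group_str, re.DOTALL) ported by hand, exactly: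
-- leftmost matching with the first alternative preferred means: at each position,
-- match X-Y when three characters remain with '-' in the middle (a (X,Y) span),
-- otherwise match the single character c (a (c,c) span). DOTALL: '.' is any char.
def pvSpansB : List Char → List (Char × Char)
  | a :: b :: c :: rest =>
      if b = '-' then (a, c) :: pvSpansB rest
      else (a, a) :: pvSpansB (b :: c :: rest)
  | a :: rest => (a, a) :: pvSpansB rest
  | [] => []

-- the characters the final set comprehension generates from one span
def pvSpanChars (p : Char × Char) : List String :=
  (PySem.List.pyRange (p.1.toNat : Int) ((p.2.toNat : Int) + 1) 1).map
    (fun code => String.ofList [Char.ofNat code.toNat])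

def expand_group_py_alt (group_str : String) : List String :=
  let spans := pvSpansB group_str.toList
  if spans.any (fun p => p.1.toNat > p.2.toNat) then []   -- the validation pass's ValueError; unreachable under Pre_
  else PySem.Set.ofList (spans.flatMap pvSpanChars)        -- the set comprehension

-- ===== PRECONDITION & SPEC =====
-- Pre_ excludes EXACTLY the inputs on which A raises ValueError: those whose scan
-- forms some range token X-Y with ord(X) > ord(Y) (equivalently, some span of the
-- tokenization is inverted); on every other input A returns normally.
def Pre_expand_group_py (group_str : String) : Prop :=
  ((pvSpansB group_str.toList).all fun p => p.1.toNat ≤ p.2.toNat) = true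
instance (group_str : String) : Decidable (Pre_expand_group_py group_str) := by
  unfold Pre_expand_group_py; infer_instance

def pvWitness_expand_group_py : String := "a-z0-9"

def Spec_expand_group_py (group_str : String) (out : List String) : Prop := out = expand_group_py_alt group_str
instance (group_str : String) (out : List String) : Decidable (Spec_expand_group_py group_str out) := by unfold Spec_expand_group_py; infer_instance

-- ===== CLAIM (what is proved, stated in full; the proofs are below) =====
def Claim_equal_expand_group_py : Prop := ∀ (group_str : String), Dom_expand_group_py group_str → Pre_expand_group_py group_str → Spec_expand_group_py group_str (expand_group_py group_str)

-- ===== LEMMAS AND PROOFS =====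

-- A's loop threading accumulator s: none iff some span of B's tokenization is invalid,
-- else the fold of B's flat character stream into s with Set.add.
theorem pvLoopA_eq_spansB (s : PySem.Set String) (cs : List Char) :
    pvLoopA s cs =
      if (pvSpansB cs).any (fun p => p.1.toNat > p.2.toNat) then none
      else some (((pvSpansB cs).flatMap pvSpanChars).foldl PySem.Set.add s) := by
  induction cs using pvSpansB.induct generalizing s with
  | case1 a c rest ih =>
      by_cases ha : a.toNat > c.toNat
      · simp [pvLoopA, pvSpansB, ha]
      · simp only [pvLoopA, pvSpansB, if_neg ha, ih]
        simp [ha, List.foldl_append, List.foldl_map, pvExpandRangeA, pvSpanChars]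
  | case2 a b c rest hb ih =>
      simp only [pvLoopA, pvSpansB, if_neg hb, ih]
      simp [pvSpanChars, PySem.List.pyRange_one_singleton]
  | case3 a rest hshape ih =>
      match rest, hshape with
      | [], _ =>
          simp [pvLoopA, pvSpansB, pvSpanChars, PySem.List.pyRange_one_singleton]
      | [b], _ =>
          simp [pvLoopA, pvSpansB, pvSpanChars, PySem.List.pyRange_one_singleton]
      | b :: c :: r, h => exact absurd rfl (h b c r)
  | case4 => simp [pvLoopA, pvSpansB]

-- ===== VERDICT (by name: the statement is the Claim_ definition above) =====
theorem expand_group_py_spec : Claim_equal_expand_group_py := by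
  intro g _ hpre
  have h : (pvSpansB g.toList).any (fun p => p.1.toNat > p.2.toNat) = false := by
    simp only [Pre_expand_group_py, List.all_eq_true] at hpre
    simp only [List.any_eq_false]
    intro p hp
    simpa using hpre p hp
  show expand_group_py g = expand_group_py_alt g
  unfold expand_group_py expand_group_py_alt
  rw [pvLoopA_eq_spansB]
  simp [h, PySem.Set.ofList_eq_foldl]
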